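-- pv_equiv track=rewrite | github.com/VyacheslavZalygin/PyEducation2021 | AnotherEGE/Jobs.22/6.py | f
-- ===== SOURCE A (Python) =====
-- def f(x):
--     a, b = 0, 0
--     while x > 0:
--         if x%2 == 0:
--             a += 1
--         else:
--             b += x%6
--         x //= 6
--     return a, b
-- ===== SOURCE B (Python) =====
-- def f(x):
--     # Collect base-6 digits first, then count even digits and sum odd digits
--     # in two separate passes over the digit list.
--     digits = []
--     while x > 0:
--         digits.append(x % 6)
--         x //= 6
--     a = sum(1 for d in digits if d % 2 == 0)
--     b = sum(d for d in digits if d % 2 == 1)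
--     return a, b
-- ===== Notes on version B (the rewrite author's own statement) =====
-- stated objective: alternative
-- what changed: B first materialises the full base-6 digit list in one loop, then computes the two results in two separate passes (count of even digits, sum of odd digits) instead of accumulating both counters inside the division loop.
import Mathlib
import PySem

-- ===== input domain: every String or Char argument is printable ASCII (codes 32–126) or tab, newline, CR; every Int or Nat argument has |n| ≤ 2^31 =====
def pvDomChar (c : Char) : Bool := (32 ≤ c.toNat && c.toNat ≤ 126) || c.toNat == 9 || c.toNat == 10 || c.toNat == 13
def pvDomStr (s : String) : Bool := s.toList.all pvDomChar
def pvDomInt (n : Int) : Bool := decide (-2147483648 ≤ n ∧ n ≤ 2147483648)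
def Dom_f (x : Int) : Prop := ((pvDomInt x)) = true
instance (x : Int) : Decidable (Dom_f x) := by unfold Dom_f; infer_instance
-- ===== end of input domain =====

-- B keeps an intermediate base-6 digit list and makes two separate passes over it
-- (alternative decomposition, same cost); return values agree with A everywhere.

-- ===== PORT A =====
-- A's while loop, carrying both accumulators; the Nat fuel only makes the
-- recursion structural (x.toNat bounds the iteration count, since x strictly
-- decreases while positive), it does not change any computed value.
def fLoop : Nat → Int → Int → Int → Int × Int
  | 0, _, a, b => (a, b)
  | Nat.succ n, x, a, b =>
    if x > 0 then
      if PySem.Int.mod x 2 = 0 then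
        fLoop n (PySem.Int.floordiv x 6) (a + 1) b
      else
        fLoop n (PySem.Int.floordiv x 6) a (b + PySem.Int.mod x 6)
    else (a, b)

def f (x : Int) : Int × Int := fLoop x.toNat x 0 0

-- ===== PORT B =====
-- first pass: collect the base-6 digits of x (same fuel discipline as above)
def fDigits : Nat → Int → List Int
  | 0, _ => []
  | Nat.succ n, x =>
    if x > 0 then
      PySem.Int.mod x 6 :: fDigits n (PySem.Int.floordiv x 6)
    else []

def f_alt (x : Int) : Int × Int :=
  let digits := fDigits x.toNat x
  ((((digits.filter (fun d => PySem.Int.mod d 2 = 0)).length : Int)),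
   (digits.filter (fun d => PySem.Int.mod d 2 = 1)).sum)

-- ===== PRECONDITION & SPEC =====
def Spec_f (x : Int) (out : Int × Int) : Prop := out = f_alt x
instance (x : Int) (out : Int × Int) : Decidable (Spec_f x out) := by unfold Spec_f; infer_instance

-- ===== CLAIM (what is proved, stated in full; the proofs are below) =====
def Claim_equal_f : Prop := ∀ (x : Int), Dom_f x → Spec_f x (f x)

-- ===== LEMMAS AND PROOFS =====

-- the parity of x agrees with the parity of its last base-6 digit
lemma mod6_parity (x : Int) : PySem.Int.mod (PySem.Int.mod x 6) 2 = PySem.Int.mod x 2 := by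
  rw [PySem.Int.mod_eq_emod_of_pos (by norm_num : (0:Int) < 2),
      PySem.Int.mod_eq_emod_of_pos (by norm_num : (0:Int) < 2),
      PySem.Int.mod_eq_emod_of_pos (by norm_num : (0:Int) < 6)]
  exact Int.emod_emod_of_dvd x (by norm_num)

lemma mod2_cases (x : Int) : PySem.Int.mod x 2 = 0 ∨ PySem.Int.mod x 2 = 1 := by
  rw [PySem.Int.mod_eq_emod_of_pos (by norm_num : (0:Int) < 2)]
  omega

lemma fLoop_eq (n : Nat) (x a b : Int) :
    fLoop n x a b =
      (a + ((fDigits n x).filter (fun d => PySem.Int.mod d 2 = 0)).length,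
       b + ((fDigits n x).filter (fun d => PySem.Int.mod d 2 = 1)).sum) := by
  induction n generalizing x a b with
  | zero => simp [fLoop, fDigits]
  | succ n ih =>
    by_cases hx : x > 0
    · rw [fLoop, fDigits]
      rcases mod2_cases x with he | ho
      · have hd : PySem.Int.mod (PySem.Int.mod x 6) 2 = 0 := by rw [mod6_parity]; exact he
        simp only [hx, if_pos, he, List.filter_cons, hd]
        rw [ih (PySem.Int.floordiv x 6) (a + 1) b]
        simp
        omega
      · have he : ¬ PySem.Int.mod x 2 = 0 := by omega
        have hd1 : PySem.Int.mod (PySem.Int.mod x 6) 2 = 1 := by rw [mod6_parity]; exact ho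
        simp only [hx, if_pos, he, List.filter_cons, hd1]
        rw [ih (PySem.Int.floordiv x 6) a (b + PySem.Int.mod x 6)]
        simp
        ring
    · rw [fLoop, fDigits]
      simp [hx]

-- ===== VERDICT (by name: the statement is the Claim_ definition above) =====
theorem f_spec : Claim_equal_f := by
  intro x _
  unfold Spec_f f f_alt
  rw [fLoop_eq x.toNat x 0 0]
  simp
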